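-- pv_equiv track=rewrite | github.com/doInfinitely/vitarc_assessment | image_to_markdown.py | count_tables
-- ===== SOURCE A (Python) =====
-- def count_tables(md: str) -> int:
--     """Count distinct markdown tables (contiguous blocks of | lines)."""
--     in_table = False
--     count = 0
--     for line in md.splitlines():
--         stripped = line.strip()
--         if stripped.startswith("|") and stripped.endswith("|"):
--             if not in_table:
--                 count += 1
--                 in_table = True
--         else:
--             in_table = False
--     return count
-- ===== SOURCE B (Python) =====
-- from itertools import groupby
--
-- def count_tables(md: str) -> int:
--     """Count distinct markdown tables (contiguous blocks of | lines)."""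
--     def is_table_line(line: str) -> bool:
--         s = line.strip()
--         return s.startswith("|") and s.endswith("|")
--     return sum(1 for key, _ in groupby(map(is_table_line, md.splitlines())) if key)
-- ===== Notes on version B (the rewrite author's own statement) =====
-- stated objective: idiomatic
-- what changed: Replaces the explicit in_table state machine with a transform-then-group pipeline: map each line to a table-line flag and count True groups via itertools.groupby.
import Mathlib
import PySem

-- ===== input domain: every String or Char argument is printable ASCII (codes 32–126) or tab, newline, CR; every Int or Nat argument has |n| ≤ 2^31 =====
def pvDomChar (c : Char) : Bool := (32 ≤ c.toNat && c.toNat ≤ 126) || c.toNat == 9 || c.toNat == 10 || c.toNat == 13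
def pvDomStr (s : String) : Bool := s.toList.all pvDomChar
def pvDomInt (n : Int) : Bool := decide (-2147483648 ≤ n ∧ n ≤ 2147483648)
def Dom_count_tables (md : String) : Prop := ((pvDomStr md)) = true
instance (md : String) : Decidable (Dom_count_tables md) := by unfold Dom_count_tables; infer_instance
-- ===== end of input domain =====

-- B replaces A's in_table state machine by mapping each line to a table-line flag and
-- counting maximal True groups (itertools.groupby pipeline); idiomatic, same cost.

-- ===== PORT A =====
-- literal port of A: fold over splitlines carrying (in_table, count)
def count_tables (md : String) : Int :=
  (((PySem.Str.splitlines md).foldl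
      (fun (st : Bool × Int) line =>
        let stripped := PySem.Str.strip line
        if PySem.Str.startswith stripped "|" && PySem.Str.endswith stripped "|" then
          if !st.1 then (true, st.2 + 1) else st
        else
          (false, st.2))
      (false, 0))).2

-- ===== PORT B =====
-- the per-line flag (B's is_table_line)
def pvIsTableLine (line : String) : Bool :=
  let s := PySem.Str.strip line
  PySem.Str.startswith s "|" && PySem.Str.endswith s "|"

-- count groups of consecutive `true`s (the groupby-and-count of Source B)
def pvCountTrueGroups : List Bool → Int
  | [] => 0
  | false :: rest => pvCountTrueGroups rest
  | true :: rest => 1 + pvCountTrueGroups (rest.dropWhile (· = true))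
termination_by l => l.length
decreasing_by
  · simp
  · simp only [List.length_cons]
    exact Nat.lt_succ_of_le (List.length_dropWhile_le _ rest)

def count_tables_alt (md : String) : Int :=
  pvCountTrueGroups ((PySem.Str.splitlines md).map pvIsTableLine)

-- ===== PRECONDITION & SPEC =====
def Spec_count_tables (md : String) (out : Int) : Prop := out = count_tables_alt md
instance (md : String) (out : Int) : Decidable (Spec_count_tables md out) := by unfold Spec_count_tables; infer_instance

-- ===== CLAIM (what is proved, stated in full; the proofs are below) =====
def Claim_equal_count_tables : Prop := ∀ (md : String), Dom_count_tables md → Spec_count_tables md (count_tables md)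

-- ===== LEMMAS AND PROOFS =====
-- A's fold, rewritten over the flag list
def pvStep (st : Bool × Int) (f : Bool) : Bool × Int :=
  if f then (if !st.1 then (true, st.2 + 1) else st) else (false, st.2)

theorem pvFold_eq (flags : List Bool) : ∀ c : Int,
    (flags.foldl pvStep (false, c)).2 = c + pvCountTrueGroups flags ∧
    (flags.foldl pvStep (true, c)).2 = c + pvCountTrueGroups (flags.dropWhile (· = true)) := by
  induction flags with
  | nil => intro c; simp [pvCountTrueGroups]
  | cons f rest ih =>
    intro c
    cases f with
    | false =>
      have h := ih c
      simp [pvStep, pvCountTrueGroups, List.dropWhile, h.1]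
    | true =>
      constructor
      · have h := (ih (c + 1)).2
        simp [pvStep, pvCountTrueGroups, h]; ring
      · have h := (ih c).2
        simp [pvStep, List.dropWhile, h]

theorem count_tables_eq_alt (md : String) : count_tables md = count_tables_alt md := by
  unfold count_tables count_tables_alt
  have hmap : ∀ (st : Bool × Int) (lines : List String),
      lines.foldl
        (fun (st : Bool × Int) line =>
          let stripped := PySem.Str.strip line
          if PySem.Str.startswith stripped "|" && PySem.Str.endswith stripped "|" then
            if !st.1 then (true, st.2 + 1) else st
          else
            (false, st.2)) st =
      (lines.map pvIsTableLine).foldl pvStep st := by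
    intro st lines
    rw [List.foldl_map]
    rfl
  rw [hmap]
  simpa using (pvFold_eq ((PySem.Str.splitlines md).map pvIsTableLine) 0).1

-- ===== VERDICT (by name: the statement is the Claim_ definition above) =====
theorem count_tables_spec : Claim_equal_count_tables := by
  intro md _
  unfold Spec_count_tables
  exact count_tables_eq_alt md
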